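-- pv_equiv track=rewrite | github.com/jqpoon/google-kickstart2021 | rounda/problem2.py | get_segments_row
-- ===== SOURCE A (Python) =====
-- def get_segments_row(row, c, idx):
--     segments = set()
--     start = -1
--     end = -1
--     for i in range(c):
--         # skip 0s
--         if not row[i]:
--             if (start != -1 and end != -1 and start != end):
--                 segments.add(((idx, start), (idx, end), end - start + 1))
--             start = -1
--             end = -1
--             continue
--
--         # start of segment
--         if (start == -1):
--             start = i
--             end = i
--             continue
--
--         end += 1
--
--     if (start != -1 and end != -1 and start != end):
--         segments.add(((idx, start), (idx, end), end - start + 1))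
--
--     return segments
-- ===== SOURCE B (Python) =====
-- def get_segments_row(row, c, idx):
--     # Staged passes: detect run boundaries by comparing each cell with its
--     # neighbour (no running state), then pair the k-th start with the k-th end.
--     v = row[:max(c, 0)]
--     n = len(v)
--     starts = [i for i in range(n) if v[i] and (i == 0 or not v[i - 1])]
--     ends = [i for i in range(n) if v[i] and (i == n - 1 or not v[i + 1])]
--     return {((idx, s), (idx, e), e - s + 1) for s, e in zip(starts, ends) if s != e}
-- ===== Notes on version B (the rewrite author's own statement) =====
-- stated objective: alternative
-- what changed: Replaced A's single stateful start/end scan by staged passes: two stateless boundary-detection comprehensions (a cell is a run start/end iff its left/right neighbour is zero or absent) followed by zipping the k-th start with the k-th end and emitting length>=2 pairs.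
import Mathlib
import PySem

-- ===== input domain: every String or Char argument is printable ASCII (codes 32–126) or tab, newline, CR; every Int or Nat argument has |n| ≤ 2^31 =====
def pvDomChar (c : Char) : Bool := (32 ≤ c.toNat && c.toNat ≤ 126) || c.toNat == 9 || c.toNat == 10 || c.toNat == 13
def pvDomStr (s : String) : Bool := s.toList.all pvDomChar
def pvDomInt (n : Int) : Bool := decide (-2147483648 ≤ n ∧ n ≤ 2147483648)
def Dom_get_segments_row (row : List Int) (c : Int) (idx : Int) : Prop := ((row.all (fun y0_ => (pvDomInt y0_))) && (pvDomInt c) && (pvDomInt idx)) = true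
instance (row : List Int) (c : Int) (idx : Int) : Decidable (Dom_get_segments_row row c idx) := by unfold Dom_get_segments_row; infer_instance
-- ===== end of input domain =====

-- B replaces A's stateful start/end scan by staged passes: two stateless boundary-detection
-- filters (start iff left neighbour zero/absent, end iff right neighbour zero/absent), then
-- zip the k-th start with the k-th end; same cost, proved equal.

-- ===== PORT A =====
-- the loop body of A's 'for i in range(c)' (state = (segments, start, end));
-- row[i] is ported as pyGetD row i 0, exact because Pre_ keeps every i of range(c) in range
def stepA (row : List Int) (idx : Int)
    (st : List ((Int × Int) × (Int × Int) × Int) × Int × Int) (i : Int) :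
    List ((Int × Int) × (Int × Int) × Int) × Int × Int :=
  let segments := st.1
  let start := st.2.1
  let e := st.2.2
  if PySem.List.pyGetD row i 0 = 0 then
    (if start ≠ -1 ∧ e ≠ -1 ∧ start ≠ e then
        PySem.Set.add segments ((idx, start), (idx, e), e - start + 1)
      else segments, -1, -1)
  else if start = -1 then (segments, i, i)
  else (segments, start, e + 1)

-- the trailing 'if' after A's loop
def finA (idx : Int) (st : List ((Int × Int) × (Int × Int) × Int) × Int × Int) :
    List ((Int × Int) × (Int × Int) × Int) :=
  if st.2.1 ≠ -1 ∧ st.2.2 ≠ -1 ∧ st.2.1 ≠ st.2.2 then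
    PySem.Set.add st.1 ((idx, st.2.1), (idx, st.2.2), st.2.2 - st.2.1 + 1)
  else st.1

def get_segments_row (row : List Int) (c : Int) (idx : Int) :
    List ((Int × Int) × (Int × Int) × Int) :=
  finA idx ((PySem.List.pyRange 0 c 1).foldl (stepA row idx) ([], -1, -1))

-- ===== PORT B =====
-- Source B line by line: v = row[:max(c,0)]; starts/ends are list comprehensions filtering range(n)
-- by a neighbour test (the 'or' short-circuits exactly as in Python: when the left disjunct is
-- true the pyGetD value is irrelevant); then a set comprehension over zip(starts, ends).
def get_segments_row_alt (row : List Int) (c : Int) (idx : Int) :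
    List ((Int × Int) × (Int × Int) × Int) :=
  let v := PySem.List.slice row none (some (max c 0))
  let n := v.length
  let starts := (List.range n).filter (fun (i : Nat) =>
    decide (PySem.List.pyGetD v (↑i) 0 ≠ 0) &&
      ((i == 0) || decide (PySem.List.pyGetD v ((↑i : Int) - 1) 0 = 0)))
  let ends := (List.range n).filter (fun (i : Nat) =>
    decide (PySem.List.pyGetD v (↑i) 0 ≠ 0) &&
      ((i == n - 1) || decide (PySem.List.pyGetD v ((↑i : Int) + 1) 0 = 0)))
  PySem.Set.ofList ((starts.zip ends).filterMap (fun p =>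
    if p.1 ≠ p.2 then
      some ((idx, (p.1 : Int)), (idx, (p.2 : Int)), (p.2 : Int) - (p.1 : Int) + 1)
    else none))

-- ===== PRECONDITION & SPEC =====
-- Pre_ excludes exactly the inputs on which Python A raises IndexError (row[i] with c > len(row))
def Pre_get_segments_row (row : List Int) (c : Int) (idx : Int) : Prop :=
  c ≤ (row.length : Int)
instance (row : List Int) (c : Int) (idx : Int) : Decidable (Pre_get_segments_row row c idx) := by
  unfold Pre_get_segments_row; infer_instance

def pvWitness_get_segments_row : List Int × Int × Int := ([1, 1, 0, 4, 5, 6], 6, 2)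

def Spec_get_segments_row (row : List Int) (c : Int) (idx : Int)
    (out : List ((Int × Int) × (Int × Int) × Int)) : Prop :=
  out = get_segments_row_alt row c idx
instance (row : List Int) (c : Int) (idx : Int) (out : List ((Int × Int) × (Int × Int) × Int)) :
    Decidable (Spec_get_segments_row row c idx out) := by
  unfold Spec_get_segments_row; infer_instance

-- ===== CLAIM (what is proved, stated in full; the proofs are below) =====
def Claim_equal_get_segments_row : Prop := ∀ (row : List Int) (c : Int) (idx : Int), Dom_get_segments_row row c idx → Pre_get_segments_row row c idx → Spec_get_segments_row row c idx (get_segments_row row c idx)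

-- ===== LEMMAS AND PROOFS =====

-- canonical list of maximal nonzero runs (start,end) of v, at absolute offset k;
-- 'some s' = a run started at s is still open
def runsAux : List Int → Nat → Option Nat → List (Nat × Nat)
  | [], _, none => []
  | [], k, some s => [(s, k - 1)]
  | a :: w, k, none =>
      if a = 0 then runsAux w (k + 1) none else runsAux w (k + 1) (some k)
  | a :: w, k, some s =>
      if a = 0 then (s, k - 1) :: runsAux w (k + 1) none else runsAux w (k + 1) (some s)

-- the segments B emits for a run list
def emitRuns (idx : Int) (rs : List (Nat × Nat)) : List ((Int × Int) × (Int × Int) × Int) :=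
  rs.filterMap (fun p =>
    if p.1 ≠ p.2 then
      some ((idx, (p.1 : Int)), (idx, (p.2 : Int)), (p.2 : Int) - (p.1 : Int) + 1)
    else none)

-- B's starts filter, recursively: prev = value left of the head
def sIdx : List Int → Int → Nat → List Nat
  | [], _, _ => []
  | a :: w, prev, k => (if a ≠ 0 ∧ prev = 0 then [k] else []) ++ sIdx w a (k + 1)

-- B's ends filter, recursively: the right neighbour is the head of the tail (0 when absent)
def eIdx : List Int → Nat → List Nat
  | [], _ => []
  | a :: w, k => (if a ≠ 0 ∧ w.getD 0 0 = 0 then [k] else []) ++ eIdx w (k + 1)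

theorem sIdx_succ (w : List Int) : ∀ (prev : Int) (k : Nat),
    sIdx w prev (k + 1) = (sIdx w prev k).map Nat.succ := by
  induction w with
  | nil => intro prev k; rfl
  | cons a u ih =>
    intro prev k
    simp only [sIdx, List.map_append, ih a]
    split_ifs <;> simp

theorem eIdx_succ (w : List Int) : ∀ (k : Nat),
    eIdx w (k + 1) = (eIdx w k).map Nat.succ := by
  induction w with
  | nil => intro k; rfl
  | cons a u ih =>
    intro k
    simp only [eIdx, List.map_append, ih]
    split_ifs <;> simp

-- the starts filter over range equals sIdx (prev-list form)
theorem starts_filter_eq (v : List Int) : ∀ (prev : Int),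
    (List.range v.length).filter
      (fun i => decide (v.getD i 0 ≠ 0) && decide ((prev :: v).getD i 0 = 0))
      = sIdx v prev 0 := by
  induction v with
  | nil => intro prev; rfl
  | cons a u ih =>
    intro prev
    rw [List.length_cons, List.range_succ_eq_map, List.filter_cons, List.filter_map]
    have hpred : ((fun i => decide ((a :: u).getD i 0 ≠ 0) && decide ((prev :: a :: u).getD i 0 = 0)) ∘ Nat.succ)
        = (fun i => decide (u.getD i 0 ≠ 0) && decide ((a :: u).getD i 0 = 0)) := by
      funext i; rfl
    rw [hpred, ih a, sIdx, ← sIdx_succ]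
    by_cases ha : a = 0 <;> by_cases hp : prev = 0 <;> simp [ha, hp, List.getD]

-- the ends filter over range equals eIdx (lookahead form)
theorem ends_filter_eq (v : List Int) :
    (List.range v.length).filter
      (fun i => decide (v.getD i 0 ≠ 0) && decide (v.getD (i + 1) 0 = 0))
      = eIdx v 0 := by
  induction v with
  | nil => rfl
  | cons a u ih =>
    rw [List.length_cons, List.range_succ_eq_map, List.filter_cons, List.filter_map]
    have hpred : ((fun i => decide ((a :: u).getD i 0 ≠ 0) && decide ((a :: u).getD (i + 1) 0 = 0)) ∘ Nat.succ)
        = (fun i => decide (u.getD i 0 ≠ 0) && decide (u.getD (i + 1) 0 = 0)) := by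
      funext i; rfl
    rw [hpred, ih, eIdx, ← eIdx_succ]
    by_cases ha : a = 0 <;> simp [ha, List.getD] <;> split_ifs <;> simp

-- sIdx/eIdx are exactly the fst/snd projections of the canonical run list
theorem runs_proj (v : List Int) : ∀ (k : Nat),
    (sIdx v 0 k = (runsAux v k none).map Prod.fst)
    ∧ (eIdx v k = (runsAux v k none).map Prod.snd)
    ∧ (∀ (s : Nat) (prev : Int), prev ≠ 0 →
        (runsAux v k (some s)).map Prod.fst = s :: sIdx v prev k)
    ∧ (∀ (s : Nat),
        (runsAux v k (some s)).map Prod.snd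
          = (if v.getD 0 0 = 0 then [k - 1] else []) ++ eIdx v k) := by
  induction v with
  | nil =>
    intro k
    refine ⟨rfl, rfl, ?_, ?_⟩
    · intro s prev hprev; simp [runsAux, sIdx]
    · intro s; simp [runsAux, eIdx, List.getD]
  | cons a u ih =>
    intro k
    by_cases ha : a = 0
    · refine ⟨?_, ?_, ?_, ?_⟩
      · simp [sIdx, runsAux, ha, (ih (k + 1)).1]
      · simp [eIdx, runsAux, ha, (ih (k + 1)).2.1]
      · intro s prev hprev
        simp [runsAux, ha, sIdx, hprev, (ih (k + 1)).1]
      · intro s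
        simp [runsAux, ha, eIdx, List.getD, (ih (k + 1)).2.1]
    · refine ⟨?_, ?_, ?_, ?_⟩
      · simp only [sIdx, runsAux, if_neg ha]
        rw [(ih (k + 1)).2.2.1 k a ha]
        simp [ha]
      · simp only [eIdx, runsAux, if_neg ha]
        rw [(ih (k + 1)).2.2.2 k]
        simp [List.getD, ha]
      · intro s prev hprev
        simp only [runsAux, if_neg ha, sIdx]
        rw [(ih (k + 1)).2.2.1 s a ha]
        simp [ha, hprev]
      · intro s
        simp only [runsAux, if_neg ha]
        rw [(ih (k + 1)).2.2.2 s]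
        simp [eIdx, List.getD, ha]

-- lower bound on run starts, for nodup
theorem runs_lb (v : List Int) : ∀ (k : Nat),
    (∀ q ∈ runsAux v k none, k ≤ q.1)
    ∧ (∀ (s : Nat), s < k → ∀ q ∈ runsAux v k (some s), s ≤ q.1) := by
  induction v with
  | nil =>
    intro k
    constructor
    · intro q hq; simp [runsAux] at hq
    · intro s _ q hq; simp [runsAux] at hq; simp [hq]
  | cons a u ih =>
    intro k
    constructor
    · intro q hq
      simp only [runsAux] at hq
      split_ifs at hq with ha
      · exact le_trans (Nat.le_succ k) ((ih (k + 1)).1 q hq)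
      · exact (ih (k + 1)).2 k (by omega) q hq
    · intro s hs q hq
      simp only [runsAux] at hq
      split_ifs at hq with ha
      · rcases List.mem_cons.mp hq with h1 | h2
        · simp [h1]
        · exact le_trans (by omega) ((ih (k + 1)).1 q h2)
      · exact (ih (k + 1)).2 s (by omega) q hq

-- run starts are strictly increasing
theorem runs_pairwise (v : List Int) : ∀ (k : Nat),
    (runsAux v k none).Pairwise (fun p q => p.1 < q.1)
    ∧ (∀ s : Nat, s < k → (runsAux v k (some s)).Pairwise (fun p q => p.1 < q.1)) := by
  induction v with
  | nil =>
    intro k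
    exact ⟨List.Pairwise.nil, fun s _ => List.pairwise_singleton _ _⟩
  | cons a u ih =>
    intro k
    constructor
    · simp only [runsAux]
      split_ifs with ha
      · exact (ih (k + 1)).1
      · exact (ih (k + 1)).2 k (Nat.lt_succ_self k)
    · intro s hs
      simp only [runsAux]
      split_ifs with ha
      · refine List.Pairwise.cons ?_ (ih (k + 1)).1
        intro q hq
        calc s < k + 1 := by omega
          _ ≤ q.1 := ((runs_lb u (k + 1)).1 q hq)
      · exact (ih (k + 1)).2 s (by omega)

theorem emitRuns_nodup (idx : Int) (rs : List (Nat × Nat))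
    (h : rs.Pairwise (fun p q => p.1 < q.1)) : (emitRuns idx rs).Nodup := by
  unfold emitRuns
  refine List.Pairwise.filterMap _ ?_ h
  intro p q hpq b hb b' hb'
  split_ifs at hb hb' with h1 h2 <;> simp only [Option.some_inj, reduceCtorEq] at hb hb'
  subst hb; subst hb'
  simp only [ne_eq, Prod.mk.injEq, not_and]
  intro h'
  omega

-- ... A-side lemmas (segment invariant & simulation) ...

def segInv (segs : List ((Int × Int) × (Int × Int) × Int)) (b : Int) : Prop :=
  ∀ q ∈ segs, q.1.2 < b

theorem segInv_mono {segs : List ((Int × Int) × (Int × Int) × Int)} {b b' : Int}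
    (h : segInv segs b) (hb : b ≤ b') : segInv segs b' :=
  fun q hq => lt_of_lt_of_le (h q hq) hb

theorem add_not_mem {s : List ((Int × Int) × (Int × Int) × Int)}
    {x : (Int × Int) × (Int × Int) × Int} (h : x ∉ s) : PySem.Set.add s x = s ++ [x] := by
  simp [PySem.Set.add, h]

-- A's loop reads row, B's reads v = row.take n: same value at every index below n
theorem getv (row : List Int) (n : Nat) (hn : n ≤ row.length) (v : List Int)
    (hv : v = row.take n) (i : Nat) (h : i < n) :
    PySem.List.pyGetD row (↑i) 0 = v.getD i 0 := by
  subst hv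
  simp [PySem.List.pyGetD_natCast, List.getD, h]

theorem emitRuns_cons (idx : Int) (x : Nat × Nat) (rs : List (Nat × Nat)) :
    emitRuns idx (x :: rs) = emitRuns idx [x] ++ emitRuns idx rs := by
  simp only [emitRuns, List.filterMap_cons, List.filterMap_nil]
  split <;> simp

theorem emitRuns_single_fst (idx : Int) (s e : Nat) :
    ∀ q ∈ emitRuns idx [(s, e)], q.1.2 = (s : Int) := by
  intro q hq
  by_cases hse : s = e
  · simp [emitRuns, hse] at hq
  · simp [emitRuns, hse] at hq
    simp [hq]

-- finalizing A's in-run state (start = s, end = p - 1) emits exactly the run's segment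
theorem finA_run (idx : Int) (segs : List ((Int × Int) × (Int × Int) × Int)) (s p : Nat)
    (hp : 1 ≤ p) (hsp : s < p) (hinv : segInv segs ↑s) :
    finA idx (segs, (↑s : Int), (↑p : Int) - 1) = segs ++ emitRuns idx [(s, p - 1)] := by
  have hc : ((p : Int) - 1) = ((p - 1 : Nat) : Int) := by omega
  simp only [finA, emitRuns, List.filterMap_cons, List.filterMap_nil]
  by_cases hne : s = p - 1
  · rw [if_neg ?_, if_neg (by simp [hne]), List.append_nil]
    intro hcond
    exact hcond.2.2 (by omega)
  · rw [if_pos ⟨by omega, by omega, by omega⟩, if_pos (by simp [hne])]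
    rw [add_not_mem ?_]
    · rw [hc]
    · intro hmem
      have := hinv _ hmem
      simp at this
  -- (the two branches: run of length 1 is dropped, otherwise the segment is appended)

-- The main simulation: from either of A's two state shapes, running A's fold to the end and
-- finalizing gives exactly the emitted segments of the canonical run list of the rest of v.
theorem mainA (row : List Int) (idx : Int) (n : Nat) (hn : n ≤ row.length)
    (v : List Int) (hv : v = row.take n) :
    ∀ f : Nat,
      (∀ (i : Nat) (segs : List ((Int × Int) × (Int × Int) × Int)), n ≤ f + i → segInv segs ↑i →
        finA idx ((PySem.List.pyRange (↑i) (↑n) 1).foldl (stepA row idx) (segs, -1, -1)) =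
          segs ++ emitRuns idx (runsAux (v.drop i) i none))
      ∧ (∀ (p s : Nat) (segs : List ((Int × Int) × (Int × Int) × Int)), n ≤ f + p → 1 ≤ p → s < p → segInv segs ↑s →
        finA idx ((PySem.List.pyRange (↑p) (↑n) 1).foldl (stepA row idx) (segs, (↑s : Int), (↑p : Int) - 1)) =
          segs ++ emitRuns idx (runsAux (v.drop p) p (some s))) := by
  have hvlen : v.length = n := by simp [hv, hn]
  intro f
  induction f with
  | zero =>
    constructor
    · intro i segs h hinv
      rw [PySem.List.pyRange_one_eq_nil (by exact_mod_cast (by omega : n ≤ i))]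
      rw [List.drop_eq_nil_of_le (by omega)]
      simp [finA, emitRuns, runsAux]
    · intro p s segs h hp1 hsp hinv
      rw [PySem.List.pyRange_one_eq_nil (by exact_mod_cast (by omega : n ≤ p))]
      rw [List.drop_eq_nil_of_le (by omega)]
      simp only [List.foldl_nil, runsAux]
      exact finA_run idx segs s p hp1 hsp hinv
  | succ g ih =>
    constructor
    · intro i segs h hinv
      by_cases hi : i < n
      · have hi' : i < v.length := by omega
        rw [PySem.List.pyRange_one_cons (by exact_mod_cast hi), List.foldl_cons]
        rw [← List.getElem_cons_drop hi']
        have hgv := getv row n hn v hv i hi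
        have hgd : v.getD i 0 = v[i] := by simp [List.getD, List.getElem?_eq_getElem hi']
        have hgd2 : v[i]?.getD 0 = v[i] := by simp [List.getElem?_eq_getElem hi']
        by_cases hz : v[i] = 0
        · have hstep : stepA row idx (segs, -1, -1) (↑i) = (segs, -1, -1) := by
            simp [stepA, hgv, hgd, hgd2, hz]
          rw [hstep]
          rw [show ((i : Int) + 1) = ((i + 1 : Nat) : Int) by push_cast; ring]
          rw [ih.1 (i + 1) segs (by omega) (segInv_mono hinv (by exact_mod_cast Nat.le_succ i))]
          simp only [runsAux, if_pos hz]
        · have hstep : stepA row idx (segs, -1, -1) (↑i) = (segs, (↑i : Int), (↑i : Int)) := by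
            simp [stepA, hgv, hgd, hgd2, hz]
          rw [hstep]
          rw [show ((i : Int) + 1) = ((i + 1 : Nat) : Int) by push_cast; ring]
          rw [show ((segs, (↑i : Int), (↑i : Int)) : List ((Int × Int) × (Int × Int) × Int) × Int × Int)
              = (segs, (↑i : Int), ((i + 1 : Nat) : Int) - 1) by push_cast; ring_nf]
          rw [ih.2 (i + 1) i segs (by omega) (by omega) (by omega) hinv]
          simp only [runsAux, if_neg hz]
      · rw [PySem.List.pyRange_one_eq_nil (by exact_mod_cast (by omega : n ≤ i))]
        rw [List.drop_eq_nil_of_le (by omega)]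
        simp [finA, emitRuns, runsAux]
    · intro p s segs h hp1 hsp hinv
      by_cases hpn : p < n
      · have hp' : p < v.length := by omega
        rw [PySem.List.pyRange_one_cons (by exact_mod_cast hpn), List.foldl_cons]
        rw [← List.getElem_cons_drop hp']
        have hgv := getv row n hn v hv p hpn
        have hgd : v.getD p 0 = v[p] := by simp [List.getD, List.getElem?_eq_getElem hp']
        have hgd2 : v[p]?.getD 0 = v[p] := by simp [List.getElem?_eq_getElem hp']
        by_cases hz : v[p] = 0
        · have hstep : stepA row idx (segs, (↑s : Int), (↑p : Int) - 1) (↑p)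
              = (finA idx (segs, (↑s : Int), (↑p : Int) - 1), -1, -1) := by
            simp [stepA, finA, hgv, hgd, hgd2, hz]
          rw [hstep, finA_run idx segs s p hp1 hsp hinv]
          rw [show ((p : Int) + 1) = ((p + 1 : Nat) : Int) by push_cast; ring]
          rw [ih.1 (p + 1) _ (by omega) ?_]
          · rw [List.append_assoc]
            congr 1
            rw [runsAux, if_pos hz, emitRuns_cons idx (s, p - 1) (runsAux (List.drop (p + 1) v) (p + 1) none)]
          · intro q hq
            rcases List.mem_append.mp hq with hql | hqr
            · exact lt_of_lt_of_le (hinv q hql) (by omega)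
            · rw [emitRuns_single_fst idx s (p - 1) q hqr]
              omega
        · have hstep : stepA row idx (segs, (↑s : Int), (↑p : Int) - 1) (↑p)
              = (segs, (↑s : Int), (↑p : Int) - 1 + 1) := by
            have hs0 : ((s : Int)) ≠ -1 := by omega
            simp [stepA, hgv, hgd, hgd2, hz, hs0]
          rw [hstep]
          rw [show ((p : Int) - 1 + 1) = ((p + 1 : Nat) : Int) - 1 by push_cast; ring]
          rw [show ((p : Int) + 1) = ((p + 1 : Nat) : Int) by push_cast; ring]
          rw [ih.2 (p + 1) s segs (by omega) (by omega) (by omega) hinv]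
          rw [runsAux, if_neg hz]
      · rw [PySem.List.pyRange_one_eq_nil (by exact_mod_cast (by omega : n ≤ p))]
        rw [List.drop_eq_nil_of_le (by omega)]
        simp only [List.foldl_nil, runsAux]
        exact finA_run idx segs s p hp1 hsp hinv

-- ===== VERDICT (by name: the statement is the Claim_ definition above) =====
theorem get_segments_row_spec : Claim_equal_get_segments_row := by
  intro row c idx _ hpre
  unfold Pre_get_segments_row at hpre
  simp only [Spec_get_segments_row, get_segments_row, get_segments_row_alt]
  by_cases hc : 0 ≤ c
  · obtain ⟨n, rfl⟩ : ∃ n : Nat, c = (n : Int) := ⟨c.toNat, by omega⟩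
    have hn : n ≤ row.length := by exact_mod_cast hpre
    have hmax : max ((n : Nat) : Int) 0 = ((n : Nat) : Int) := by omega
    rw [hmax, PySem.List.slice_to_natCast]
    set v := row.take n with hv
    have hvlen : v.length = n := by simp [hv, hn]
    rw [hvlen]
    -- the starts filter equals the prev-list form
    have hsf : (List.range n).filter (fun (i : Nat) =>
        decide (PySem.List.pyGetD v (↑i) 0 ≠ 0) &&
          ((i == 0) || decide (PySem.List.pyGetD v ((↑i : Int) - 1) 0 = 0)))
        = (List.range n).filter
            (fun i => decide (v.getD i 0 ≠ 0) && decide (((0 : Int) :: v).getD i 0 = 0)) := by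
      apply List.filter_congr
      intro i _
      cases i with
      | zero => simp [PySem.List.pyGetD_zero, List.getD]
      | succ j =>
        have h1 : ((↑(j + 1) : Int) - 1) = ((j : Nat) : Int) := by push_cast; ring
        have h3 : PySem.List.pyGetD v ((j : Int) + 1) 0 = v[j + 1]?.getD 0 := by
          rw [show ((j : Int) + 1) = ((j + 1 : Nat) : Int) by push_cast; ring,
            PySem.List.pyGetD_natCast]
          rfl
        simp [h1, PySem.List.pyGetD_natCast, List.getD]
        rw [h3]
        rfl
    -- the ends filter equals the lookahead form (needs i < n for the last index)
    have hef : (List.range n).filter (fun (i : Nat) =>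
        decide (PySem.List.pyGetD v (↑i) 0 ≠ 0) &&
          ((i == n - 1) || decide (PySem.List.pyGetD v ((↑i : Int) + 1) 0 = 0)))
        = (List.range n).filter
            (fun i => decide (v.getD i 0 ≠ 0) && decide (v.getD (i + 1) 0 = 0)) := by
      apply List.filter_congr
      intro i hi
      rw [List.mem_range] at hi
      have hcast : ((↑i : Int) + 1) = ((i + 1 : Nat) : Int) := by push_cast; ring
      by_cases hlast : i = n - 1
      · subst hlast
        have h0 : v[n - 1 + 1]?.getD (0 : Int) = 0 := by
          simp [List.getElem?_eq_none (show v.length ≤ n - 1 + 1 by omega)]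
        simp [PySem.List.pyGetD_natCast, List.getD, h0]
      · have hne : (i == n - 1) = false := by simp [hlast]
        have h2 : PySem.List.pyGetD v ((i : Int) + 1) 0 = v[i + 1]?.getD 0 := by
          rw [hcast, PySem.List.pyGetD_natCast]
          rfl
        simp [hne, PySem.List.pyGetD_natCast, List.getD]
        rw [h2]
        rfl
    have hs' := starts_filter_eq v 0
    have he' := ends_filter_eq v
    rw [hvlen] at hs' he'
    rw [hsf, hef, hs', he']
    rw [(runs_proj v 0).1, (runs_proj v 0).2.1]
    rw [List.zip_map']
    have hzip : (runsAux v 0 none).map (fun p => (p.1, p.2)) = runsAux v 0 none := by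
      simp
    rw [hzip]
    have hB : ((runsAux v 0 none).filterMap (fun p =>
        if p.1 ≠ p.2 then
          some ((idx, (p.1 : Int)), (idx, (p.2 : Int)), (p.2 : Int) - (p.1 : Int) + 1)
        else none)) = emitRuns idx (runsAux v 0 none) := rfl
    rw [hB, PySem.Set.ofList_eq_self_of_nodup _
        (emitRuns_nodup idx _ ((runs_pairwise v 0).1))]
    have hmain := (mainA row idx n hn v hv n).1 0 [] (by omega) (by intro q hq; simp at hq)
    simpa using hmain
  · have hmax : max c 0 = 0 := by omega
    rw [hmax, PySem.List.pyRange_one_eq_nil (by omega)]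
    have hsl : PySem.List.slice row none (some (0 : Int)) = ([] : List Int) := by
      rw [PySem.List.slice_to row (by omega)]
      simp
    rw [hsl]
    rfl
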